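-- pv_equiv track=rewrite | github.com/serdar-ozata/cs490python | util.py | get_sorted_degree_list
-- ===== SOURCE A (Python) =====
-- MIN_REASSIGN_LIMIT = 2
--
-- def get_sorted_degree_list(send_list: list[dict[int, set]], reverse=True):
--     e_degrees = [(len(arr), idx, k) for idx in range(len(send_list)) for k, arr in send_list[idx].items()]
--     e_degrees.sort(key=lambda i: i[0], reverse=reverse)
--     if reverse:
--         it = range(len(e_degrees) - 1, -1, -1)
--         increment = 1
--         lowest_val = len(e_degrees) - 1
--     else:
--         it = range(len(e_degrees))
--         increment = -1
--         lowest_val = 0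
--     for i in it:
--         if MIN_REASSIGN_LIMIT < e_degrees[i][0]:
--             if lowest_val == i:
--                 return e_degrees
--             else:
--                 i += increment
--                 return [*e_degrees[i:], *e_degrees[0:i]]
--     return e_degrees
-- ===== SOURCE B (Python) =====
-- MIN_REASSIGN_LIMIT = 2
--
-- def get_sorted_degree_list(send_list: list[dict[int, set]], reverse=True):
--     e_degrees = [(len(arr), idx, k) for idx, d in enumerate(send_list) for k, arr in d.items()]
--     e_degrees.sort(key=lambda t: t[0], reverse=reverse)
--     n = len(e_degrees)
--     lo, hi = 0, n
--     if reverse: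
--         # binary search: lo becomes the number of degrees > MIN_REASSIGN_LIMIT
--         while lo < hi:
--             mid = (lo + hi) // 2
--             if e_degrees[mid][0] > MIN_REASSIGN_LIMIT:
--                 lo = mid + 1
--             else:
--                 hi = mid
--         return e_degrees[lo:] + e_degrees[:lo]
--     else:
--         # binary search: lo becomes the first index with degree > MIN_REASSIGN_LIMIT
--         while lo < hi:
--             mid = (lo + hi) // 2
--             if e_degrees[mid][0] > MIN_REASSIGN_LIMIT:
--                 hi = mid
--             else:
--                 lo = mid + 1
--         if lo == n or lo == 0:
--             return e_degrees
--         return e_degrees[lo - 1:] + e_degrees[:lo - 1]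
-- ===== Notes on version B (the rewrite author's own statement) =====
-- stated objective: alternative
-- what changed: A's post-sort linear scan over the index range with two early returns is replaced by a binary search for the threshold boundary in the sorted degree list followed by a single slice rotation.
import Mathlib
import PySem

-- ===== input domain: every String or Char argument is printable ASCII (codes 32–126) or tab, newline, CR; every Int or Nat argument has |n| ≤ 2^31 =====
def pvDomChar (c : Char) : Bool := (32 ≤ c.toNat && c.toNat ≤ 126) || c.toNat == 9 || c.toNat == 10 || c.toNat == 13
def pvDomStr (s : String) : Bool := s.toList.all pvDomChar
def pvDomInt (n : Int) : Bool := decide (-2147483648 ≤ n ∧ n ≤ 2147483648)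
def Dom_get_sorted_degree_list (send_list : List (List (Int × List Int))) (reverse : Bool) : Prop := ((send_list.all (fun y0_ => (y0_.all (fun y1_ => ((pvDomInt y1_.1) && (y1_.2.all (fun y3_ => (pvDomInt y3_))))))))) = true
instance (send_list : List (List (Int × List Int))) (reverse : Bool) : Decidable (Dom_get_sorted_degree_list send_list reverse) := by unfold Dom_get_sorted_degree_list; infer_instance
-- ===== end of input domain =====

-- B replaces A's linear boundary scan (with its two early returns) by a binary search for the
-- threshold boundary followed by a single rotation expression (objective: alternative).

-- ===== PORT A =====
-- A's for-loop over `it` with early returns; exact on in-range indices (all indices drawn from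
-- `it` are in range, so the pyGetD default (0,0,0) is never the returned value).
def pvALoop (e : List (Int × Int × Int)) (increment lowest_val : Int) :
    List Int → List (Int × Int × Int)
  | [] => e
  | i :: rest =>
    if 2 < (PySem.List.pyGetD e i (0, 0, 0)).1 then
      if lowest_val = i then e
      else
        PySem.List.slice e (some (i + increment)) none ++
          PySem.List.slice e (some 0) (some (i + increment))
    else pvALoop e increment lowest_val rest

def get_sorted_degree_list (send_list : List (List (Int × List Int))) (reverse : Bool) :
    List (Int × Int × Int) :=
  let e0 := (PySem.List.pyRange 0 (send_list.length : Int) 1).flatMap (fun idx =>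
      ((PySem.Dict.ofList (PySem.List.pyGetD send_list idx [])).items).map
        (fun p => (((PySem.Set.ofList p.2).length : Int), idx, p.1)))
  let e := PySem.List.sorted e0 (fun t => t.1) reverse
  let n : Int := (e.length : Int)
  let it := if reverse then PySem.List.pyRange (n - 1) (-1) (-1) else PySem.List.pyRange 0 n 1
  let increment : Int := if reverse then 1 else -1
  let lowest_val : Int := if reverse then n - 1 else 0
  pvALoop e increment lowest_val it

-- ===== PORT B =====
-- binary search: final lo = number of leading elements of `e` with degree > 2 (descending order)
def pvBsearchDesc (e : List (Int × Int × Int)) (lo hi : Nat) : Nat :=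
  if h : lo < hi then
    let mid := (lo + hi) / 2
    if 2 < (PySem.List.pyGetD e (mid : Int) (0, 0, 0)).1 then pvBsearchDesc e (mid + 1) hi
    else pvBsearchDesc e lo mid
  else lo
termination_by hi - lo
decreasing_by all_goals omega

-- binary search: final lo = first index of `e` with degree > 2 (ascending order)
def pvBsearchAsc (e : List (Int × Int × Int)) (lo hi : Nat) : Nat :=
  if h : lo < hi then
    let mid := (lo + hi) / 2
    if 2 < (PySem.List.pyGetD e (mid : Int) (0, 0, 0)).1 then pvBsearchAsc e lo mid
    else pvBsearchAsc e (mid + 1) hi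
  else lo
termination_by hi - lo
decreasing_by all_goals omega

def get_sorted_degree_list_alt (send_list : List (List (Int × List Int))) (reverse : Bool) :
    List (Int × Int × Int) :=
  let e0 := (PySem.List.enumerate send_list 0).flatMap (fun p =>
      ((PySem.Dict.ofList p.2).items).map
        (fun q => (((PySem.Set.ofList q.2).length : Int), p.1, q.1)))
  let e := PySem.List.sorted e0 (fun t => t.1) reverse
  let n := e.length
  if reverse then
    let lo := pvBsearchDesc e 0 n
    e.drop lo ++ e.take lo
  else
    let lo := pvBsearchAsc e 0 n
    if lo = n ∨ lo = 0 then e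
    else e.drop (lo - 1) ++ e.take (lo - 1)

-- ===== PRECONDITION & SPEC =====
def Spec_get_sorted_degree_list (send_list : List (List (Int × List Int))) (reverse : Bool) (out : List (Int × Int × Int)) : Prop := out = get_sorted_degree_list_alt send_list reverse
instance (send_list : List (List (Int × List Int))) (reverse : Bool) (out : List (Int × Int × Int)) : Decidable (Spec_get_sorted_degree_list send_list reverse out) := by unfold Spec_get_sorted_degree_list; infer_instance

-- ===== CLAIM (what is proved, stated in full; the proofs are below) =====
def Claim_equal_get_sorted_degree_list : Prop := ∀ (send_list : List (List (Int × List Int))) (reverse : Bool), Dom_get_sorted_degree_list send_list reverse → Spec_get_sorted_degree_list send_list reverse (get_sorted_degree_list send_list reverse)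

-- ===== LEMMAS AND PROOFS =====

-- the two ports build the same unsorted degree list
theorem pv_e0_eq (send_list : List (List (Int × List Int))) :
    (PySem.List.enumerate send_list 0).flatMap (fun p =>
      ((PySem.Dict.ofList p.2).items).map
        (fun q => (((PySem.Set.ofList q.2).length : Int), p.1, q.1)))
    = (PySem.List.pyRange 0 (send_list.length : Int) 1).flatMap (fun idx =>
      ((PySem.Dict.ofList (PySem.List.pyGetD send_list idx [])).items).map
        (fun p => (((PySem.Set.ofList p.2).length : Int), idx, p.1))) := by
  rw [PySem.List.enumerate_eq_map_pyRange send_list ([] : List (Int × List Int))]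
  simp [List.flatMap_map]

-- descending characterization: the elements with degree > 2 occupy exactly the first
-- countP positions
theorem pv_char_desc (s : List (Int × Int × Int))
    (hp : s.Pairwise (fun a b => b.1 ≤ a.1)) :
    ∀ k (hk : k < s.length),
      (2 < s[k].1 ↔ k < s.countP (fun t => decide (2 < t.1))) := by
  induction s with
  | nil => intro k hk; simp at hk
  | cons a t ih =>
    intro k hk
    rcases List.pairwise_cons.mp hp with ⟨ha, ht⟩
    by_cases hQ : 2 < a.1
    · have hc : (a :: t).countP (fun t => decide (2 < t.1))
          = t.countP (fun t => decide (2 < t.1)) + 1 := by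
        simp [List.countP_cons, hQ]
      cases k with
      | zero => simp only [List.getElem_cons_zero, hc]; constructor
                · intro _; omega
                · intro _; exact hQ
      | succ k =>
        have hk' : k < t.length := by simpa using hk
        rw [List.getElem_cons_succ, hc, ih ht k hk']
        omega
    · have hcz : t.countP (fun t => decide (2 < t.1)) = 0 := by
        rw [List.countP_eq_zero]
        intro x hx
        have h1 : x.1 ≤ a.1 := ha x hx
        simp only [decide_eq_true_eq]
        omega
      have hc : (a :: t).countP (fun t => decide (2 < t.1)) = 0 := by
        simp [hQ, hcz]
      cases k with
      | zero => simp only [List.getElem_cons_zero, hc]; constructor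
                · intro h; exact absurd h hQ
                · intro h; omega
      | succ k =>
        have hk' : k < t.length := by simpa using hk
        rw [List.getElem_cons_succ, hc, ih ht k hk', hcz]
        omega

-- ascending characterization: the elements with degree > 2 occupy exactly the positions
-- from countP(≤2) on
theorem pv_char_asc (s : List (Int × Int × Int))
    (hp : s.Pairwise (fun a b => a.1 ≤ b.1)) :
    ∀ k (hk : k < s.length),
      (2 < s[k].1 ↔ s.countP (fun t => decide (¬ 2 < t.1)) ≤ k) := by
  induction s with
  | nil => intro k hk; simp at hk
  | cons a t ih =>
    intro k hk
    rcases List.pairwise_cons.mp hp with ⟨ha, ht⟩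
    by_cases hQ : 2 < a.1
    · have hcz : t.countP (fun t => decide (¬ 2 < t.1)) = 0 := by
        rw [List.countP_eq_zero]
        intro x hx
        have h1 : a.1 ≤ x.1 := ha x hx
        have h2 : 2 < x.1 := by omega
        simp [h2]
      have hc : (a :: t).countP (fun t => decide (¬ 2 < t.1)) = 0 := by
        rw [List.countP_eq_zero]
        intro x hx
        rcases List.mem_cons.mp hx with rfl | hx'
        · simp [hQ]
        · have h1 : a.1 ≤ x.1 := ha x hx'
          have h2 : 2 < x.1 := by omega
          simp [h2]
      cases k with
      | zero => simp only [List.getElem_cons_zero, hc]; constructor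
                · intro _; omega
                · intro _; exact hQ
      | succ k =>
        have hk' : k < t.length := by simpa using hk
        have hx : 2 < t[k].1 := by
          have h1 : a.1 ≤ t[k].1 := ha _ (List.getElem_mem hk')
          omega
        rw [List.getElem_cons_succ, hc]
        constructor
        · intro _; omega
        · intro _; exact hx
    · have hc : (a :: t).countP (fun t => decide (¬ 2 < t.1))
          = t.countP (fun t => decide (¬ 2 < t.1)) + 1 := by
        simp [List.countP_cons, hQ]
      cases k with
      | zero => simp only [List.getElem_cons_zero, hc]; constructor
                · intro h; exact absurd h hQ
                · intro h; omega
      | succ k =>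
        have hk' : k < t.length := by simpa using hk
        rw [List.getElem_cons_succ, hc, ih ht k hk']
        omega

-- binary search correctness, descending case
theorem pv_bsearchDesc_eq (s : List (Int × Int × Int)) (p : Nat)
    (hchar : ∀ k (hk : k < s.length), (2 < s[k].1 ↔ k < p)) :
    ∀ lo hi, lo ≤ p → p ≤ hi → hi ≤ s.length → pvBsearchDesc s lo hi = p := by
  intro lo hi
  fun_induction pvBsearchDesc s lo hi with
  | case1 lo hi h mid hif ih =>
    intro h1 h2 h3
    have hm : mid < s.length := by omega
    have hg : PySem.List.pyGetD s (mid : Int) (0, 0, 0) = s[mid] := by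
      rw [PySem.List.pyGetD_eq_getElem s _ (by omega) (by exact_mod_cast hm)]
      simp
    rw [hg] at hif
    have := (hchar mid hm).mp hif
    exact ih (by omega) h2 h3
  | case2 lo hi h mid hif ih =>
    intro h1 h2 h3
    have hm : mid < s.length := by omega
    have hg : PySem.List.pyGetD s (mid : Int) (0, 0, 0) = s[mid] := by
      rw [PySem.List.pyGetD_eq_getElem s _ (by omega) (by exact_mod_cast hm)]
      simp
    rw [hg] at hif
    have : ¬ mid < p := fun hc => hif ((hchar mid hm).mpr hc)
    exact ih h1 (by omega) (by omega)
  | case3 lo hi h =>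
    intro h1 h2 h3; omega

-- binary search correctness, ascending case
theorem pv_bsearchAsc_eq (s : List (Int × Int × Int)) (c : Nat)
    (hchar : ∀ k (hk : k < s.length), (2 < s[k].1 ↔ c ≤ k)) :
    ∀ lo hi, lo ≤ c → c ≤ hi → hi ≤ s.length → pvBsearchAsc s lo hi = c := by
  intro lo hi
  fun_induction pvBsearchAsc s lo hi with
  | case1 lo hi h mid hif ih =>
    intro h1 h2 h3
    have hm : mid < s.length := by omega
    have hg : PySem.List.pyGetD s (mid : Int) (0, 0, 0) = s[mid] := by
      rw [PySem.List.pyGetD_eq_getElem s _ (by omega) (by exact_mod_cast hm)]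
      simp
    rw [hg] at hif
    have := (hchar mid hm).mp hif
    exact ih h1 (by omega) (by omega)
  | case2 lo hi h mid hif ih =>
    intro h1 h2 h3
    have hm : mid < s.length := by omega
    have hg : PySem.List.pyGetD s (mid : Int) (0, 0, 0) = s[mid] := by
      rw [PySem.List.pyGetD_eq_getElem s _ (by omega) (by exact_mod_cast hm)]
      simp
    rw [hg] at hif
    have : ¬ c ≤ mid := fun hc => hif ((hchar mid hm).mpr hc)
    exact ih (by omega) h2 h3
  | case3 lo hi h =>
    intro h1 h2 h3; omega

-- A's loop skips every index whose element fails the threshold test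
theorem pv_aLoop_skip (e : List (Int × Int × Int)) (inc lv : Int) (l1 l2 : List Int)
    (hfail : ∀ i ∈ l1, ¬ 2 < (PySem.List.pyGetD e i (0, 0, 0)).1) :
    pvALoop e inc lv (l1 ++ l2) = pvALoop e inc lv l2 := by
  induction l1 with
  | nil => rfl
  | cons i rest ih =>
    have hi : ¬ 2 < (PySem.List.pyGetD e i (0, 0, 0)).1 := hfail i (by simp)
    simp only [List.cons_append, pvALoop, if_neg hi]
    exact ih (fun j hj => hfail j (by simp [hj]))

-- A's loop over the descending index range equals the rotation at the boundary p
theorem pv_aLoop_desc (s : List (Int × Int × Int)) (p : Nat) (hpn : p ≤ s.length)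
    (hchar : ∀ k (hk : k < s.length), (2 < s[k].1 ↔ k < p)) :
    pvALoop s 1 ((s.length : Int) - 1) (PySem.List.pyRange ((s.length : Int) - 1) (-1) (-1))
      = s.drop p ++ s.take p := by
  have hget : ∀ (k : Nat), k < s.length →
      (2 < (PySem.List.pyGetD s (k : Int) (0, 0, 0)).1 ↔ k < p) := by
    intro k hk
    rw [PySem.List.pyGetD_eq_getElem s _ (by omega) (by exact_mod_cast hk)]
    simp only [Int.toNat_natCast]
    exact hchar k hk
  rw [PySem.List.pyRange_neg_one_eq_reverse]
  have hr : (-1 : Int) + 1 = 0 := by norm_num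
  have hr2 : ((s.length : Int) - 1) + 1 = (s.length : Int) := by ring
  rw [hr, hr2]
  rw [PySem.List.pyRange_one_append 0 (p : Int) (s.length : Int) (by omega)
    (by exact_mod_cast hpn)]
  rw [List.reverse_append]
  have hskip : ∀ i ∈ (PySem.List.pyRange (p : Int) (s.length : Int) 1).reverse,
      ¬ 2 < (PySem.List.pyGetD s i (0, 0, 0)).1 := by
    intro i hi
    rw [List.mem_reverse, PySem.List.mem_pyRange_one] at hi
    have h0 : 0 ≤ i := le_trans (by omega) hi.1
    obtain ⟨k, rfl⟩ : ∃ k : Nat, i = (k : Int) := ⟨i.toNat, by omega⟩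
    have hk : k < s.length := by exact_mod_cast hi.2
    rw [hget k hk]
    have : (p : Int) ≤ (k : Int) := hi.1
    omega
  rw [pv_aLoop_skip s 1 _ _ _ hskip]
  rcases Nat.eq_zero_or_pos p with hp0 | hppos
  · subst hp0
    simp [pvALoop]
  · have hsplit : PySem.List.pyRange 0 (p : Int) 1
        = PySem.List.pyRange 0 ((p : Int) - 1) 1 ++ [(p : Int) - 1] := by
      have h := PySem.List.pyRange_one_succ_right (a := 0) (b := (p : Int) - 1) (by omega)
      have he : (p : Int) - 1 + 1 = (p : Int) := by ring
      rw [he] at h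
      exact h
    rw [hsplit, List.reverse_append]
    simp only [List.reverse_singleton, List.singleton_append, pvALoop]
    have hpm : ((p : Int) - 1) = ((p - 1 : Nat) : Int) := by omega
    have hpm1 : p - 1 < s.length := by omega
    rw [hpm]
    rw [if_pos ((hget (p - 1) hpm1).mpr (by omega))]
    by_cases hlast : ((s.length : Int) - 1) = ((p - 1 : Nat) : Int)
    · -- p = length: every element passes, list returned unchanged; rotation at p is also s
      have hpl : p = s.length := by omega
      rw [if_pos hlast, hpl]
      simp
    · rw [if_neg hlast]
      have hj : ((p - 1 : Nat) : Int) + 1 = (p : Int) := by omega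
      rw [hj, PySem.List.slice_from_natCast]
      have := PySem.List.slice_zero_start (xs := s) (b? := some (p : Int))
      rw [this, PySem.List.slice_to_natCast]

-- A's loop over the ascending index range equals B's rotation at the boundary c
theorem pv_aLoop_asc (s : List (Int × Int × Int)) (c : Nat) (hcn : c ≤ s.length)
    (hchar : ∀ k (hk : k < s.length), (2 < s[k].1 ↔ c ≤ k)) :
    pvALoop s (-1) 0 (PySem.List.pyRange 0 (s.length : Int) 1)
      = if c = s.length ∨ c = 0 then s else s.drop (c - 1) ++ s.take (c - 1) := by
  have hget : ∀ (k : Nat), k < s.length →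
      (2 < (PySem.List.pyGetD s (k : Int) (0, 0, 0)).1 ↔ c ≤ k) := by
    intro k hk
    rw [PySem.List.pyGetD_eq_getElem s _ (by omega) (by exact_mod_cast hk)]
    simp only [Int.toNat_natCast]
    exact hchar k hk
  rw [PySem.List.pyRange_one_append 0 (c : Int) (s.length : Int) (by omega)
    (by exact_mod_cast hcn)]
  have hskip : ∀ i ∈ PySem.List.pyRange 0 (c : Int) 1,
      ¬ 2 < (PySem.List.pyGetD s i (0, 0, 0)).1 := by
    intro i hi
    rw [PySem.List.mem_pyRange_one] at hi
    obtain ⟨k, rfl⟩ : ∃ k : Nat, i = (k : Int) := ⟨i.toNat, by omega⟩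
    have hk : k < s.length := by
      have : (k : Int) < (c : Int) := hi.2
      omega
    rw [hget k hk]
    have : (k : Int) < (c : Int) := hi.2
    omega
  rw [pv_aLoop_skip s (-1) 0 _ _ hskip]
  rcases Nat.lt_or_ge c s.length with hclt | hcge
  · -- c < length: loop reaches index c, whose element passes
    rw [PySem.List.pyRange_one_cons (by exact_mod_cast hclt)]
    simp only [pvALoop]
    rw [if_pos ((hget c hclt).mpr (by omega))]
    rcases Nat.eq_zero_or_pos c with hc0 | hcpos
    · subst hc0; simp
    · have hne : ¬ (0 : Int) = (c : Int) := by omega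
      rw [if_neg hne, if_neg (by omega)]
      have hj : (c : Int) + (-1) = ((c - 1 : Nat) : Int) := by omega
      rw [hj, PySem.List.slice_from_natCast]
      have := PySem.List.slice_zero_start (xs := s) (b? := some ((c - 1 : Nat) : Int))
      rw [this, PySem.List.slice_to_natCast]
  · -- c = length: no element passes, loop falls through
    have hceq : c = s.length := by omega
    rw [hceq]
    simp [PySem.List.pyRange_one_eq_nil, pvALoop]

-- ===== VERDICT (by name: the statement is the Claim_ definition above) =====
theorem get_sorted_degree_list_spec : Claim_equal_get_sorted_degree_list := by
  intro send_list reverse _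
  unfold Spec_get_sorted_degree_list get_sorted_degree_list get_sorted_degree_list_alt
  rw [pv_e0_eq]
  set e0 := (PySem.List.pyRange 0 (send_list.length : Int) 1).flatMap (fun idx =>
      ((PySem.Dict.ofList (PySem.List.pyGetD send_list idx [])).items).map
        (fun p => (((PySem.Set.ofList p.2).length : Int), idx, p.1))) with he0
  cases reverse with
  | true =>
    simp only [reduceIte]
    set s := PySem.List.sorted e0 (fun t => t.1) true with hs
    have hpair : s.Pairwise (fun a b => b.1 ≤ a.1) := PySem.List.sorted_pairwise_rev e0 _
    set p := s.countP (fun t => decide (2 < t.1)) with hp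
    have hpn : p ≤ s.length := List.countP_le_length
    have hchar := pv_char_desc s hpair
    rw [pv_aLoop_desc s p hpn hchar,
        pv_bsearchDesc_eq s p hchar 0 s.length (by omega) hpn (le_refl _)]
  | false =>
    simp only [Bool.false_eq_true, reduceIte]
    set s := PySem.List.sorted e0 (fun t => t.1) false with hs
    have hpair : s.Pairwise (fun a b => a.1 ≤ b.1) := PySem.List.sorted_pairwise e0 _
    set c := s.countP (fun t => decide (¬ 2 < t.1)) with hc
    have hcn : c ≤ s.length := List.countP_le_length
    have hchar := pv_char_asc s hpair
    rw [pv_aLoop_asc s c hcn hchar,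
        pv_bsearchAsc_eq s c hchar 0 s.length (by omega) hcn (le_refl _)]
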